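-- pv_equiv track=rewrite | github.com/sokeki/reverie-bot | utils/ranks.py | _rank_name
-- ===== SOURCE A (Python) =====
-- GREEK_LETTERS = [
--     ("Alpha", "α"),
--     ("Beta", "β"),
--     ("Gamma", "γ"),
--     ("Delta", "δ"),
--     ("Epsilon", "ε"),
--     ("Zeta", "ζ"),
--     ("Eta", "η"),
--     ("Theta", "θ"),
--     ("Iota", "ι"),
--     ("Kappa", "κ"),
--     ("Lambda", "λ"),
--     ("Mu", "μ"),
--     ("Nu", "ν"),
--     ("Xi", "ξ"),
--     ("Omicron", "ο"),
--     ("Pi", "π"),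
--     ("Rho", "ρ"),
--     ("Sigma", "σ"),
--     ("Tau", "τ"),
--     ("Upsilon", "υ"),
--     ("Phi", "φ"),
--     ("Chi", "χ"),
--     ("Psi", "ψ"),
--     ("Omega", "ω"),
-- ]
--
-- BASE = 24  # number of Greek letters
--
-- def _rank_name(rank_index: int) -> str:
--     """Return the English name for a rank index (e.g. 0=Alpha, 24=Alpha-Alpha)."""
--     if rank_index < BASE:
--         return GREEK_LETTERS[rank_index][0]
--
--     # Build combination name by treating rank_index as a base-24 number
--     parts = []
--     n = rank_index
--     while n >= 0:
--         parts.append(GREEK_LETTERS[n % BASE][0])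
--         n = n // BASE - 1
--         if n < 0:
--             break
--     return "-".join(reversed(parts))
-- ===== SOURCE B (Python) =====
-- GREEK_LETTERS = [
--     ("Alpha", "α"), ("Beta", "β"), ("Gamma", "γ"), ("Delta", "δ"),
--     ("Epsilon", "ε"), ("Zeta", "ζ"), ("Eta", "η"), ("Theta", "θ"),
--     ("Iota", "ι"), ("Kappa", "κ"), ("Lambda", "λ"), ("Mu", "μ"),
--     ("Nu", "ν"), ("Xi", "ξ"), ("Omicron", "ο"), ("Pi", "π"),
--     ("Rho", "ρ"), ("Sigma", "σ"), ("Tau", "τ"), ("Upsilon", "υ"),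
--     ("Phi", "φ"), ("Chi", "χ"), ("Psi", "ψ"), ("Omega", "ω"),
-- ]
--
-- BASE = 24
--
--
-- def _rank_name(rank_index: int) -> str:
--     """Direct recursion over the bijective base-24 decomposition."""
--     if rank_index < BASE:
--         return GREEK_LETTERS[rank_index][0]
--     return _rank_name(rank_index // BASE - 1) + "-" + GREEK_LETTERS[rank_index % BASE][0]
-- ===== Notes on version B (the rewrite author's own statement) =====
-- stated objective: simpler
-- what changed: Replaced the while-loop that appends base-24 digits to a list, reverses it and joins with '-' by a direct recursion over the bijective base-24 decomposition that prepends the higher digits: no accumulator list, no reverse, no join.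
import Mathlib
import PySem

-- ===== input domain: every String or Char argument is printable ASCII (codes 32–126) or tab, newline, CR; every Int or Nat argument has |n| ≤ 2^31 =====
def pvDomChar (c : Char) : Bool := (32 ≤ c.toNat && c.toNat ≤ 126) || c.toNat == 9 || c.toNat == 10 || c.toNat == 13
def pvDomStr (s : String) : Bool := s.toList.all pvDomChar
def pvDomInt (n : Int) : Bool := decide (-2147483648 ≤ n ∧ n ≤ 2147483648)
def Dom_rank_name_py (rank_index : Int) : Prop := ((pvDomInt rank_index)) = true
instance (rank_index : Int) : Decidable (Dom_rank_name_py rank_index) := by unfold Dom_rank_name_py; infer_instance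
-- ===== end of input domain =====

-- B replaces A's append-then-reverse-then-join while-loop by a direct recursion on the
-- bijective base-24 decomposition (objective: simpler; same cost).

-- ===== PORT A =====
-- GREEK_LETTERS (shared constant data of the module)
def pvGreek : List (String × String) :=
  [("Alpha", "α"), ("Beta", "β"), ("Gamma", "γ"), ("Delta", "δ"),
   ("Epsilon", "ε"), ("Zeta", "ζ"), ("Eta", "η"), ("Theta", "θ"),
   ("Iota", "ι"), ("Kappa", "κ"), ("Lambda", "λ"), ("Mu", "μ"),
   ("Nu", "ν"), ("Xi", "ξ"), ("Omicron", "ο"), ("Pi", "π"),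
   ("Rho", "ρ"), ("Sigma", "σ"), ("Tau", "τ"), ("Upsilon", "υ"),
   ("Phi", "φ"), ("Chi", "χ"), ("Psi", "ψ"), ("Omega", "ω")]

-- GREEK_LETTERS[i][0]; pyGet? = none is Python's IndexError (excluded by Pre_), .getD "" is never the value returned inside Pre_
def pvLetterAt (i : Int) : String :=
  ((PySem.List.pyGet? pvGreek i).map Prod.fst).getD ""

-- the 'while n >= 0: parts.append(...); n = n // BASE - 1; if n < 0: break' loop
def rankLoopA (n : Int) (parts : List String) : List String :=
  if _h : 0 ≤ n then
    -- parts.append(GREEK_LETTERS[n % BASE][0]); n = n // BASE - 1; if n < 0: break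
    if _h2 : PySem.Int.floordiv n 24 - 1 < 0 then parts ++ [pvLetterAt (PySem.Int.mod n 24)]
    else rankLoopA (PySem.Int.floordiv n 24 - 1) (parts ++ [pvLetterAt (PySem.Int.mod n 24)])
  else parts
termination_by n.toNat
decreasing_by
  have h24 : PySem.Int.floordiv n 24 = n / 24 := PySem.Int.floordiv_eq_ediv_of_pos (by omega)
  have h1 : n / 24 ≤ n := Int.ediv_le_self 24 _h
  omega

def rank_name_py (rank_index : Int) : String :=
  if rank_index < 24 then pvLetterAt rank_index
  else PySem.Str.join "-" ((rankLoopA rank_index []).reverse)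

-- ===== PORT B =====
def rank_name_py_alt (rank_index : Int) : String :=
  if _h : rank_index < 24 then pvLetterAt rank_index
  else rank_name_py_alt (PySem.Int.floordiv rank_index 24 - 1) ++ "-"
       ++ pvLetterAt (PySem.Int.mod rank_index 24)
termination_by rank_index.toNat
decreasing_by
  have h24 : PySem.Int.floordiv rank_index 24 = rank_index / 24 := PySem.Int.floordiv_eq_ediv_of_pos (by omega)
  have h1 : rank_index / 24 ≤ rank_index := Int.ediv_le_self 24 (by omega)
  have h2 : 1 ≤ rank_index / 24 := by
    rw [← h24, PySem.Int.le_floordiv_iff_mul_le (by omega)]; omega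
  omega

-- ===== PRECONDITION & SPEC =====
-- Pre_ excludes rank_index < -24, where A's GREEK_LETTERS[rank_index] raises IndexError.
def Pre_rank_name_py (rank_index : Int) : Prop := -24 ≤ rank_index
instance (rank_index : Int) : Decidable (Pre_rank_name_py rank_index) := by unfold Pre_rank_name_py; infer_instance
def pvWitness_rank_name_py : Int := (601)

def Spec_rank_name_py (rank_index : Int) (out : String) : Prop := out = rank_name_py_alt rank_index
instance (rank_index : Int) (out : String) : Decidable (Spec_rank_name_py rank_index out) := by unfold Spec_rank_name_py; infer_instance

-- ===== CLAIM (what is proved, stated in full; the proofs are below) =====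
def Claim_equal_rank_name_py : Prop := ∀ (rank_index : Int), Dom_rank_name_py rank_index → Pre_rank_name_py rank_index → Spec_rank_name_py rank_index (rank_name_py rank_index)

-- ===== LEMMAS AND PROOFS =====

-- the loop's accumulator only ever grows at the back
theorem rankLoopA_acc (n : Int) (parts : List String) :
    rankLoopA n parts = parts ++ rankLoopA n [] := by
  conv_lhs => rw [rankLoopA]
  conv_rhs => rw [rankLoopA]
  by_cases h : 0 ≤ n
  · rw [dif_pos h, dif_pos h]
    by_cases h2 : PySem.Int.floordiv n 24 - 1 < 0
    · rw [dif_pos h2, dif_pos h2]; simp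
    · rw [dif_neg h2, dif_neg h2,
          rankLoopA_acc _ (parts ++ [pvLetterAt (PySem.Int.mod n 24)]),
          rankLoopA_acc _ ([] ++ [pvLetterAt (PySem.Int.mod n 24)])]
      simp
  · rw [dif_neg h, dif_neg h]
    simp
termination_by n.toNat
decreasing_by
  all_goals
    have h24 : PySem.Int.floordiv n 24 = n / 24 := PySem.Int.floordiv_eq_ediv_of_pos (by omega)
    have h1 : n / 24 ≤ n := Int.ediv_le_self 24 h
    omega

theorem rankLoopA_ne_nil (n : Int) (hn : 0 ≤ n) : rankLoopA n [] ≠ [] := by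
  rw [rankLoopA, dif_pos hn]
  by_cases h2 : PySem.Int.floordiv n 24 - 1 < 0
  · rw [dif_pos h2]; simp
  · rw [dif_neg h2, rankLoopA_acc]; simp

-- "-".join on the character level, for a nonempty list extended by one element
theorem charsJoin_append_singleton (d x : List Char) :
    ∀ ys : List (List Char), ys ≠ [] →
      PySem.Chars.join d (ys ++ [x]) = PySem.Chars.join d ys ++ d ++ x := by
  intro ys hys
  induction ys with
  | nil => exact absurd rfl hys
  | cons a ys ih =>
    cases ys with
    | nil =>
      rw [List.cons_append, List.nil_append, PySem.Chars.join_cons_cons,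
          PySem.Chars.join_singleton, PySem.Chars.join_singleton]
    | cons b zs =>
      simp only [List.cons_append] at ih ⊢
      rw [PySem.Chars.join_cons_cons, PySem.Chars.join_cons_cons, ih (by simp)]
      simp [List.append_assoc]

-- the same fact one level up, on strings
theorem join_append_singleton (x : String) (ys : List String) (h : ys ≠ []) :
    PySem.Str.join "-" (ys ++ [x]) = PySem.Str.join "-" ys ++ "-" ++ x := by
  simp only [PySem.Str.join, List.map_append, List.map_cons, List.map_nil]
  rw [charsJoin_append_singleton _ _ _ (by simpa using h),
      String.ofList_append, String.ofList_append, String.ofList_toList,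
      String.ofList_toList]

-- A's reversed-digit join equals B's recursion, for every nonnegative n
theorem loop_join_eq_alt (n : Int) (hn : 0 ≤ n) :
    PySem.Str.join "-" ((rankLoopA n []).reverse) = rank_name_py_alt n := by
  have h24 : PySem.Int.floordiv n 24 = n / 24 := PySem.Int.floordiv_eq_ediv_of_pos (by omega)
  rw [rankLoopA, rank_name_py_alt, dif_pos hn]
  by_cases hlt : n < 24
  · -- single digit: the loop breaks immediately and B is in its base case
    have hd : PySem.Int.floordiv n 24 - 1 < 0 := by
      rw [h24, Int.ediv_eq_zero_of_lt hn hlt]; omega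
    have hmod : PySem.Int.mod n 24 = n := by
      rw [PySem.Int.mod_eq_emod_of_pos (by omega)]; omega
    rw [dif_pos hd, dif_pos hlt, hmod, List.nil_append, List.reverse_singleton]
    simp only [PySem.Str.join, List.map_cons, List.map_nil, PySem.Chars.join_singleton,
      String.ofList_toList]
  · -- n ≥ 24: peel the least-significant digit off the back
    have hd : ¬ PySem.Int.floordiv n 24 - 1 < 0 := by
      rw [h24]
      have : 1 ≤ n / 24 := (Int.le_ediv_iff_mul_le (by omega)).mpr (by omega)
      omega
    have hn' : 0 ≤ PySem.Int.floordiv n 24 - 1 := by omega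
    rw [dif_neg hd, dif_neg hlt, rankLoopA_acc, List.nil_append, List.reverse_append,
        List.reverse_singleton]
    have hne : (rankLoopA (PySem.Int.floordiv n 24 - 1) []).reverse ≠ [] := fun hc =>
      rankLoopA_ne_nil _ hn' (by rwa [List.reverse_eq_nil_iff] at hc)
    rw [join_append_singleton _ _ hne, loop_join_eq_alt _ hn']
termination_by n.toNat
decreasing_by
  have h1 : n / 24 ≤ n := Int.ediv_le_self 24 hn
  omega

-- ===== VERDICT (by name: the statement is the Claim_ definition above) =====
theorem rank_name_py_spec : Claim_equal_rank_name_py := by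
  intro rank_index _hdom _hpre
  unfold Spec_rank_name_py rank_name_py
  by_cases h : rank_index < 24
  · rw [rank_name_py_alt, if_pos h, dif_pos h]
  · rw [if_neg h, loop_join_eq_alt _ (by omega)]
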